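-- pv_equiv track=rewrite | github.com/A-Ulkryxx/CS320 | Lab 4 Longest Torus/Attempt1.py | next_neighbor
-- ===== SOURCE A (Python) =====
-- def next_neighbor(torus, trail, neighbors, current):
--     possible_elems = []
--     possible_neighbors = []
--     for neighbor in neighbors:
--         row, column = get_neighbor_indices(neighbor)
--         value = torus[row][column]
--         temp_tup = (row, column)
--         if ((not visited(trail, temp_tup)) and (value > current)):
--             possible_elems.append(value)
--             possible_neighbors.append(neighbor)
--     if possible_elems == []:
--         return None
--     next_elem = min(possible_elems)
--     # if( possible_elems.count(next_elem) > 1):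
--     temp_ind = possible_elems.index(next_elem)
--     next_indices = possible_neighbors[temp_ind]
--     path = (next_indices[0], next_indices[1])
--     trail.append(path)
--     return next_indices
--
-- def visited(trail, tup):
--     return (tup in trail)
--
-- def get_neighbor_indices(neighbor):
--     return neighbor[0], neighbor[1]
-- ===== SOURCE B (Python) =====
-- def next_neighbor(torus, trail, neighbors, current):
--     # One pass: keep (best_value, best_neighbor); strict < reproduces min()+index() first-minimum tie-breaking.
--     best = None
--     for neighbor in neighbors:
--         row, column = neighbor[0], neighbor[1]
--         value = torus[row][column]
--         if (row, column) in trail or value <= current: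
--             continue
--         if best is None or value < best[0]:
--             best = (value, neighbor)
--     if best is None:
--         return None
--     trail.append((best[1][0], best[1][1]))
--     return best[1]
-- ===== Notes on version B (the rewrite author's own statement) =====
-- stated objective: simpler
-- what changed: Replaces the two parallel candidate lists plus separate min() and .index() scans with a single pass that maintains the running (best_value, best_neighbor) pair, using strict < so ties keep the first minimum exactly as min()+index() does.
import Mathlib
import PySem

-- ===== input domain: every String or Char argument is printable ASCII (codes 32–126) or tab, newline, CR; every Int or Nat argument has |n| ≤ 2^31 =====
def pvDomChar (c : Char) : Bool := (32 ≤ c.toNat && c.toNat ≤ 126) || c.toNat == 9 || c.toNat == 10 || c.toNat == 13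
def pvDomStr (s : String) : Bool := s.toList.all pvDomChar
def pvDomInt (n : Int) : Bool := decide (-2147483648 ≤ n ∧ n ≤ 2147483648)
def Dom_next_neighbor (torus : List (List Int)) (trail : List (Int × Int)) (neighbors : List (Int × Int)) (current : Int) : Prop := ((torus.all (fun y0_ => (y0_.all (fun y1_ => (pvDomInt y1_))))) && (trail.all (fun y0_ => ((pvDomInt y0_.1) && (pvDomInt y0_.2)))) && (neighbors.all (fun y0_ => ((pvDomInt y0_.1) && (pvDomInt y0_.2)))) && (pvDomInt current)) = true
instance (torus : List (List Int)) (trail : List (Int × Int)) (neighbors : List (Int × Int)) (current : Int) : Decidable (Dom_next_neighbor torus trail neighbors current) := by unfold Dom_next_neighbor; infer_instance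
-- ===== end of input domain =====

-- B replaces A's two parallel candidate lists + min()/index() scans by one pass keeping the running
-- (best_value, best_neighbor) pair (strict < reproduces the first-minimum tie-break); objective: simpler.
-- A (and B identically) appends the chosen pair to `trail` in place; the theorems are about the return value.

-- ===== PORT A =====
def next_neighbor (torus : List (List Int)) (trail : List (Int × Int)) (neighbors : List (Int × Int)) (current : Int) : Option (Int × Int) :=
  let r := neighbors.foldl (fun acc neighbor =>
      let row := neighbor.1
      let column := neighbor.2
      -- torus[row][column]; Pre_ guarantees both indexings succeed, defaults unreachable
      let value := PySem.List.pyGetD (PySem.List.pyGetD torus row []) column 0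
      if ¬ trail.contains (row, column) ∧ value > current then
        (acc.1 ++ [value], acc.2 ++ [neighbor])
      else acc) (([] : List Int), ([] : List (Int × Int)))
  if r.1 = [] then none
  else
    match PySem.List.min? r.1 (fun x => x) with
    | none => none  -- unreachable: r.1 ≠ []
    | some next_elem =>
      match PySem.List.index? r.1 next_elem with
      | none => none  -- unreachable: next_elem ∈ r.1
      | some temp_ind =>
        match PySem.List.pyGet? r.2 (temp_ind : Int) with
        | none => none  -- unreachable: temp_ind < length
        | some next_indices => some next_indices

-- ===== PORT B =====
def next_neighbor_alt (torus : List (List Int)) (trail : List (Int × Int)) (neighbors : List (Int × Int)) (current : Int) : Option (Int × Int) :=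
  let best := neighbors.foldl (fun best neighbor =>
      let row := neighbor.1
      let column := neighbor.2
      let value := PySem.List.pyGetD (PySem.List.pyGetD torus row []) column 0
      if trail.contains (row, column) ∨ value ≤ current then best
      else
        match best with
        | none => some (value, neighbor)
        | some b => if value < b.1 then some (value, neighbor) else best) none
  best.map (·.2)

-- ===== PRECONDITION & SPEC =====
-- Pre_ excludes exactly the inputs where Python A raises IndexError: some neighbor's (possibly
-- negative, wrapping) indices fall outside the torus; B raises identically there.
def Pre_next_neighbor (torus : List (List Int)) (trail : List (Int × Int)) (neighbors : List (Int × Int)) (current : Int) : Prop :=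
  neighbors.all (fun nb =>
    match PySem.List.pyGet? torus nb.1 with
    | some row => (PySem.List.pyGet? row nb.2).isSome
    | none => false) = true
instance (torus : List (List Int)) (trail : List (Int × Int)) (neighbors : List (Int × Int)) (current : Int) : Decidable (Pre_next_neighbor torus trail neighbors current) := by unfold Pre_next_neighbor; infer_instance

def pvWitness_next_neighbor : List (List Int) × (List (Int × Int)) × (List (Int × Int)) × Int :=
  ([[1, 2], [3, 4]], [(0, 0)], [(0, 1), (1, 0), (1, 1)], 1)

def Spec_next_neighbor (torus : List (List Int)) (trail : List (Int × Int)) (neighbors : List (Int × Int)) (current : Int) (out : Option (Int × Int)) : Prop := out = next_neighbor_alt torus trail neighbors current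
instance (torus : List (List Int)) (trail : List (Int × Int)) (neighbors : List (Int × Int)) (current : Int) (out : Option (Int × Int)) : Decidable (Spec_next_neighbor torus trail neighbors current out) := by unfold Spec_next_neighbor; infer_instance

-- ===== CLAIM (what is proved, stated in full; the proofs are below) =====
def Claim_equal_next_neighbor : Prop := ∀ (torus : List (List Int)) (trail : List (Int × Int)) (neighbors : List (Int × Int)) (current : Int), Dom_next_neighbor torus trail neighbors current → Pre_next_neighbor torus trail neighbors current → Spec_next_neighbor torus trail neighbors current (next_neighbor torus trail neighbors current)

-- ===== LEMMAS AND PROOFS =====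

-- The invariant tying A's parallel lists (pe, pn) to B's running best option.
def pvInv (pe : List Int) (pn : List (Int × Int)) (best : Option (Int × (Int × Int))) : Prop :=
  pe.length = pn.length ∧
  ((pe = [] ∧ best = none) ∨
   (∃ v nb i, best = some (v, nb) ∧ PySem.List.min? pe (fun x => x) = some v ∧
      PySem.List.index? pe v = some i ∧ pn[i]? = some nb))

theorem pvInv_nil : pvInv [] [] none := ⟨rfl, Or.inl ⟨rfl, rfl⟩⟩

theorem min?_append_singleton (pe : List Int) (m v : Int)
    (h : PySem.List.min? pe (fun x => x) = some m) :
    PySem.List.min? (pe ++ [v]) (fun x => x) = some (min m v) := by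
  cases pe with
  | nil =>
    rw [show (PySem.List.min? ([] : List Int) (fun x => x)) = none from
      (PySem.List.min?_eq_none_iff _ _).mpr rfl] at h
    simp at h
  | cons x t =>
    rw [PySem.List.min?_id_cons] at h
    rw [List.cons_append, PySem.List.min?_id_cons, List.foldl_append]
    simp_all

def pvBStep (best : Option (Int × (Int × Int))) (v : Int) (nb : Int × Int) :
    Option (Int × (Int × Int)) :=
  match best with
  | none => some (v, nb)
  | some b => if v < b.1 then some (v, nb) else best

theorem pvInv_step (pe : List Int) (pn : List (Int × Int)) (best : Option (Int × (Int × Int)))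
    (v : Int) (nb : Int × Int) (h : pvInv pe pn best) :
    pvInv (pe ++ [v]) (pn ++ [nb]) (pvBStep best v nb) := by
  unfold pvBStep
  obtain ⟨hlen, hcase⟩ := h
  refine ⟨by simp [hlen], ?_⟩
  rcases hcase with ⟨hpe, hb⟩ | ⟨m, bnb, i, hb, hmin, hidx, hget⟩
  · subst hpe; subst hb
    have hpn : pn = [] := List.length_eq_zero_iff.mp hlen.symm
    subst hpn
    exact Or.inr ⟨v, nb, 0, rfl, by simp [PySem.List.min?_id_cons],
      by simp [PySem.List.index?_eq_idxOf?], by simp⟩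
  · subst hb
    by_cases hlt : v < m
    · simp only [hlt, if_pos]
      refine Or.inr ⟨v, nb, pe.length, rfl, ?_, ?_, ?_⟩
      · rw [min?_append_singleton pe m v hmin]; simp [min_eq_right (le_of_lt hlt)]
      · refine PySem.List.index?_append_singleton_self _ _ ?_
        intro hv
        exact absurd (PySem.List.min?_isMin hmin v hv) (by omega)
      · rw [hlen, List.getElem?_append_right (le_refl _), Nat.sub_self]; simp
    · simp only [hlt, if_neg, if_false]
      refine Or.inr ⟨m, bnb, i, rfl, ?_, ?_, ?_⟩
      · rw [min?_append_singleton pe m v hmin]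
        simp [min_eq_left (by omega : m ≤ v)]
      · rw [PySem.List.index?_append_of_mem _ (PySem.List.min?_mem hmin), hidx]
      · have hi : i < pn.length := by
          rw [← hlen]
          rw [PySem.List.index?_eq_idxOf?] at hidx
          exact List.idxOf?_eq_some_iff.mp hidx |>.1
        rw [List.getElem?_append_left hi]; exact hget

-- A's post-loop min/index/lookup collapses to best.map snd under the invariant.
theorem pvFinish (pe : List Int) (pn : List (Int × Int)) (best : Option (Int × (Int × Int)))
    (h : pvInv pe pn best) :
    (if pe = [] then none
     else
       match PySem.List.min? pe (fun x => x) with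
       | none => none
       | some next_elem =>
         match PySem.List.index? pe next_elem with
         | none => none
         | some temp_ind =>
           match PySem.List.pyGet? pn (temp_ind : Int) with
           | none => none
           | some next_indices => some next_indices) = best.map (·.2) := by
  obtain ⟨_, hcase⟩ := h
  rcases hcase with ⟨hpe, hb⟩ | ⟨m, bnb, i, hb, hmin, hidx, hget⟩
  · subst hpe hb; simp
  · subst hb
    have hne : pe ≠ [] := by
      intro h; subst h
      have h0 : (PySem.List.min? ([] : List Int) (fun x => x)) = none :=
        (PySem.List.min?_eq_none_iff _ _).mpr rfl
      rw [h0] at hmin; simp at hmin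
    rw [if_neg hne]
    simp only [hmin, hidx, PySem.List.pyGet?_natCast, hget, Option.map]

theorem pvLoop (torus : List (List Int)) (trail : List (Int × Int)) (current : Int)
    (neighbors : List (Int × Int)) (pe : List Int) (pn : List (Int × Int))
    (best : Option (Int × (Int × Int))) (h : pvInv pe pn best) :
    pvInv
      (neighbors.foldl (fun acc neighbor =>
        let value := PySem.List.pyGetD (PySem.List.pyGetD torus neighbor.1 []) neighbor.2 0
        if ¬ trail.contains (neighbor.1, neighbor.2) ∧ value > current then
          (acc.1 ++ [value], acc.2 ++ [neighbor])
        else acc) (pe, pn)).1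
      (neighbors.foldl (fun acc neighbor =>
        let value := PySem.List.pyGetD (PySem.List.pyGetD torus neighbor.1 []) neighbor.2 0
        if ¬ trail.contains (neighbor.1, neighbor.2) ∧ value > current then
          (acc.1 ++ [value], acc.2 ++ [neighbor])
        else acc) (pe, pn)).2
      (neighbors.foldl (fun best neighbor =>
        let value := PySem.List.pyGetD (PySem.List.pyGetD torus neighbor.1 []) neighbor.2 0
        if trail.contains (neighbor.1, neighbor.2) ∨ value ≤ current then best
        else
          match best with
          | none => some (value, neighbor)
          | some b => if value < b.1 then some (value, neighbor) else best) best) := by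
  induction neighbors generalizing pe pn best with
  | nil => simpa using h
  | cons nb rest ih =>
    simp only [List.foldl_cons]
    split_ifs with h1 h2 h2
    · exact absurd h2 (by rcases h2 with h2 | h2
                          · exact absurd h2 (by simpa using h1.1)
                          · exact absurd h1.2 (by omega))
    · exact ih _ _ _ (pvInv_step pe pn best (PySem.List.pyGetD (PySem.List.pyGetD torus nb.1 []) nb.2 0) nb h)
    · exact ih _ _ _ h
    · exact absurd (by by_contra hcc
                       push_neg at hcc
                       exact h1 ⟨by simpa using hcc.1, by omega⟩) h2

-- ===== VERDICT (by name: the statement is the Claim_ definition above) =====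
theorem next_neighbor_spec : Claim_equal_next_neighbor := by
  intro torus trail neighbors current _ _
  unfold Spec_next_neighbor next_neighbor next_neighbor_alt
  exact pvFinish _ _ _ (pvLoop torus trail current neighbors [] [] none pvInv_nil)
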